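-- pv_equiv track=rewrite | github.com/housestudy/codingTest | soyeun/후보키.py | solution
-- ===== SOURCE A (Python) =====
-- from itertools import combinations
--
-- def solution(relation):
--     n = len(relation)
--     m = len(relation[0])
--
--     combi = []
--     for i in range(1,m+1):
--         combi.extend(combinations(range(m),i))
--
--     unique = []
--     for j in combi:
--         temp = [tuple(item[key] for key in j) for item in relation]
--         if len(set(temp)) == n:
--             unique.append(j)
--
--     answer = set(unique)
--     for k in range(len(unique)):
--         for l in range(k+1,len(unique)):
--             if len(unique[k]) == len(set(unique[k]) & set(unique[l])):
--                 answer.discard(unique[l])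
--
--     return len(answer)
-- ===== SOURCE B (Python) =====
-- from itertools import combinations
--
-- def solution(relation):
--     n = len(relation)
--     m = len(relation[0])
--     keys = []
--     for size in range(1, m + 1):
--         for combo in combinations(range(m), size):
--             cols = set(combo)
--             if any(k <= cols for k in keys):
--                 continue
--             if len({tuple(row[c] for c in combo) for row in relation}) == n:
--                 keys.append(cols)
--     return len(keys)
-- ===== Notes on version B (the rewrite author's own statement) =====
-- stated objective: faster
-- what changed: A collects every unique column subset and then removes non-minimal ones with a pairwise O(U^2) set-intersection elimination pass; B is a single size-ordered pass that skips any combination containing an already-accepted key, so the O(U^2) elimination disappears and the expensive projection/uniqueness test is never run on supersets of accepted keys.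
import Mathlib
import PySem

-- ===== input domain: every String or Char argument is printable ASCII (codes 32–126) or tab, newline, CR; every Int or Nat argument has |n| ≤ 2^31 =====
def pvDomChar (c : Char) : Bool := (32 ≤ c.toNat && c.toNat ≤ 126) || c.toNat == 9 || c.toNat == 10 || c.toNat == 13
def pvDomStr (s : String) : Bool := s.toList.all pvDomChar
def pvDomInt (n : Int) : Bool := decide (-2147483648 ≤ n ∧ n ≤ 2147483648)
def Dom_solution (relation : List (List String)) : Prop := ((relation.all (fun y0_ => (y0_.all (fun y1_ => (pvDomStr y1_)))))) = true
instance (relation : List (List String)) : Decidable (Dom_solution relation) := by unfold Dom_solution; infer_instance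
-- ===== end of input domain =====

-- B replaces A's two-phase "collect all unique column subsets, then pairwise superset elimination"
-- by a single size-ordered pass that skips any combination containing an already-accepted key,
-- dropping the pairwise elimination phase and pruning uniqueness tests (objective: faster, as measured).

-- ===== PORT A =====
-- itertools.combinations(xs, k) in lexicographic order (shared helper: both Pythons import it)
def pvCombos : List Int → Nat → List (List Int)
  | _, 0 => [[]]
  | [], _ + 1 => []
  | x :: xs, k + 1 => (pvCombos xs k).map (fun t => x :: t) ++ pvCombos xs (k + 1)

def solution (relation : List (List String)) : Int :=
  let n : Int := relation.length
  let m : Int := (relation.headD []).length      -- relation[0]; Pre_ excludes the empty relation (IndexError)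
  let combi : List (List Int) :=
    (PySem.List.pyRange 1 (m + 1) 1).foldl
      (fun acc i => acc ++ pvCombos (PySem.List.pyRange 0 m 1) i.toNat) []
  let unique : List (List Int) :=
    combi.foldl (fun acc j =>
      if PySem.Set.len (PySem.Set.ofList (relation.map (fun item =>
            j.map (fun key => PySem.List.pyGetD item key "")))) = n
      then acc ++ [j] else acc) []
  let answer : PySem.Set (List Int) :=
    (PySem.List.pyRange 0 (unique.length : Int) 1).foldl (fun ans k =>
      (PySem.List.pyRange (k + 1) (unique.length : Int) 1).foldl (fun ans2 l =>
        let uk := PySem.List.pyGetD unique k []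
        let ul := PySem.List.pyGetD unique l []
        if (uk.length : Int) = PySem.Set.len (PySem.Set.inter (PySem.Set.ofList uk) (PySem.Set.ofList ul))
        then PySem.Set.discard ans2 ul else ans2) ans)
      (PySem.Set.ofList unique)
  PySem.Set.len answer

-- ===== PORT B =====
def solution_alt (relation : List (List String)) : Int :=
  let n : Int := relation.length
  let m : Int := (relation.headD []).length
  let keys : List (PySem.Set Int) :=
    (PySem.List.pyRange 1 (m + 1) 1).foldl (fun ks size =>
      (pvCombos (PySem.List.pyRange 0 m 1) size.toNat).foldl (fun ks combo =>
        let cols : PySem.Set Int := PySem.Set.ofList combo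
        if ks.any (fun k => PySem.Set.issubset k cols) then ks
        else if PySem.Set.len (PySem.Set.ofList (relation.map (fun row =>
              combo.map (fun c => PySem.List.pyGetD row c "")))) = n
        then ks ++ [cols] else ks) ks) []
  (keys.length : Int)

-- ===== PRECONDITION & SPEC =====
-- Pre_ excludes exactly the inputs on which Python A raises IndexError: the empty relation
-- (relation[0]) and relations in which some row is shorter than the first row (item[key]).
def Pre_solution (relation : List (List String)) : Prop :=
  relation ≠ [] ∧ ∀ row ∈ relation, (relation.headD []).length ≤ row.length
instance (relation : List (List String)) : Decidable (Pre_solution relation) := by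
  unfold Pre_solution; infer_instance

def pvWitness_solution : List (List String) := [["a", "b"], ["c", "b"]]

def Spec_solution (relation : List (List String)) (out : Int) : Prop := out = solution_alt relation
instance (relation : List (List String)) (out : Int) : Decidable (Spec_solution relation out) := by
  unfold Spec_solution; infer_instance

-- ===== CLAIM (what is proved, stated in full; the proofs are below) =====
def Claim_equal_solution : Prop := ∀ (relation : List (List String)), Dom_solution relation → Pre_solution relation → Spec_solution relation (solution relation)

-- ===== LEMMAS AND PROOFS =====

-- proof-side abbreviations
def pvSub (a b : List Int) : Bool := a.all (fun t => b.contains t)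

def pvUniq (relation : List (List String)) (j : List Int) : Bool :=
  decide (PySem.Set.len (PySem.Set.ofList (relation.map (fun item =>
    j.map (fun key => PySem.List.pyGetD item key "")))) = (relation.length : Int))

def pvCombi (m : Nat) : List (List Int) :=
  (List.range m).flatMap (fun k => pvCombos (PySem.List.pyRange 0 (m : Int) 1) (k + 1))

def pvU (relation : List (List String)) : List (List Int) :=
  (pvCombi (relation.headD []).length).filter (pvUniq relation)

def pvKeep (u : List (List Int)) (x : List Int) : Bool :=
  u.all (fun y => !pvSub y x || y == x)

-- combinations: members are sublists of the base of the given length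
theorem pvCombos_mem_length {C : List Int} {k : Nat} {j : List Int}
    (h : j ∈ pvCombos C k) : j.length = k := by
  induction C generalizing k j with
  | nil =>
    cases k with
    | zero => simp [pvCombos] at h; simp [h]
    | succ k => simp [pvCombos] at h
  | cons x xs ih =>
    cases k with
    | zero => simp [pvCombos] at h; simp [h]
    | succ k =>
      simp only [pvCombos, List.mem_append, List.mem_map] at h
      rcases h with ⟨t, ht, rfl⟩ | h
      · simp [ih ht]
      · exact ih h

theorem pvCombos_mem_sublist {C : List Int} {k : Nat} {j : List Int}
    (h : j ∈ pvCombos C k) : j.Sublist C := by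
  induction C generalizing k j with
  | nil =>
    cases k with
    | zero => simp [pvCombos] at h; simp [h]
    | succ k => simp [pvCombos] at h
  | cons x xs ih =>
    cases k with
    | zero => simp [pvCombos] at h; simp [h]
    | succ k =>
      simp only [pvCombos, List.mem_append, List.mem_map] at h
      rcases h with ⟨t, ht, rfl⟩ | h
      · exact List.Sublist.cons₂ x (ih ht)
      · exact List.Sublist.cons x (ih h)

theorem pvCombos_nodup {C : List Int} (hC : C.Nodup) : ∀ (k : Nat), (pvCombos C k).Nodup := by
  induction C with
  | nil => intro k; cases k <;> simp [pvCombos]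
  | cons x xs ih =>
    intro k
    cases k with
    | zero => simp [pvCombos]
    | succ k =>
      have hx : x ∉ xs := (List.nodup_cons.mp hC).1
      have hxs : xs.Nodup := (List.nodup_cons.mp hC).2
      simp only [pvCombos]
      rw [List.nodup_append]
      refine ⟨(ih hxs k).map ?_, ih hxs (k + 1), ?_⟩
      · intro a b hab; exact (List.cons_inj_right x).mp hab
      · intro a ha b hb hne
        simp only [List.mem_map] at ha
        rcases ha with ⟨t, ht, rfl⟩
        rcases hne with rfl
        exact hx ((pvCombos_mem_sublist hb).subset (List.mem_cons_self ..))

theorem pvFlat_nodup {C : List Int} (hC : C.Nodup) (l : List Nat) (hl : l.Nodup) :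
    (l.flatMap (fun k => pvCombos C (k + 1))).Nodup := by
  induction l with
  | nil => simp
  | cons k rest ih =>
    simp only [List.flatMap_cons]
    rw [List.nodup_append]
    refine ⟨pvCombos_nodup hC _, ih (List.nodup_cons.mp hl).2, ?_⟩
    intro a ha b hb hne
    rcases hne with rfl
    simp only [List.mem_flatMap] at hb
    rcases hb with ⟨k', hk', hb⟩
    have h1 := pvCombos_mem_length ha
    have h2 := pvCombos_mem_length hb
    have : k = k' := by omega
    exact (List.nodup_cons.mp hl).1 (this ▸ hk')

theorem pvCombi_nodup (m : Nat) : (pvCombi m).Nodup :=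
  pvFlat_nodup (PySem.List.nodup_pyRange_one 0 (m : Int)) _ List.nodup_range

theorem pvFlat_sizes {C : List Int} (l : List Nat) (hl : l.Pairwise (· ≤ ·)) :
    (l.flatMap (fun k => pvCombos C (k + 1))).Pairwise (fun a b => a.length ≤ b.length) := by
  induction l with
  | nil => simp
  | cons k rest ih =>
    simp only [List.flatMap_cons]
    rw [List.pairwise_append]
    refine ⟨List.pairwise_of_forall_mem_list ?_, ih (List.pairwise_cons.mp hl).2, ?_⟩
    · intro a ha b hb
      rw [pvCombos_mem_length ha, pvCombos_mem_length hb]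
    · intro a ha b hb
      simp only [List.mem_flatMap] at hb
      rcases hb with ⟨k', hk', hb⟩
      rw [pvCombos_mem_length ha, pvCombos_mem_length hb]
      have := (List.pairwise_cons.mp hl).1 k' hk'
      omega

theorem pvCombi_sizes (m : Nat) :
    (pvCombi m).Pairwise (fun a b => a.length ≤ b.length) :=
  pvFlat_sizes _ List.pairwise_le_range

theorem pvCombi_mem_sorted {m : Nat} {j : List Int} (h : j ∈ pvCombi m) :
    j.Pairwise (· < ·) := by
  simp only [pvCombi, List.mem_flatMap] at h
  rcases h with ⟨k, _, h⟩
  exact List.Pairwise.sublist (pvCombos_mem_sublist h) (PySem.List.pairwise_lt_pyRange_one 0 (m : Int))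

theorem pvCombi_mem_nodup {m : Nat} {j : List Int} (h : j ∈ pvCombi m) : j.Nodup :=
  (pvCombi_mem_sorted h).imp (fun h => ne_of_lt h)

-- subset arithmetic on strictly sorted lists
theorem pvSub_iff (a b : List Int) : pvSub a b = true ↔ ∀ t ∈ a, t ∈ b := by
  simp [pvSub]

theorem pvSub_length_le {a b : List Int} (ha : a.Nodup) (h : pvSub a b = true) :
    a.length ≤ b.length :=
  (ha.subperm (fun t ht => (pvSub_iff a b).mp h t ht)).length_le

theorem pvSub_eq_of_length {a b : List Int} (ha : a.Pairwise (· < ·)) (hb : b.Pairwise (· < ·))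
    (h : pvSub a b = true) (hl : b.length ≤ a.length) : a = b := by
  have hnd : a.Nodup := ha.imp (fun h => ne_of_lt h)
  have hperm := (hnd.subperm (fun t ht => (pvSub_iff a b).mp h t ht)).perm_of_length_le hl
  exact List.Perm.eq_of_pairwise (fun x y _ _ h1 h2 => absurd h2 (not_lt_of_gt h1)) ha hb hperm

theorem pvSub_lt_of_ne {a b : List Int} (ha : a.Pairwise (· < ·)) (hb : b.Pairwise (· < ·))
    (h : pvSub a b = true) (hne : a ≠ b) : a.length < b.length := by
  rcases Nat.lt_or_ge a.length b.length with h' | h'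
  · exact h'
  · exact absurd (pvSub_eq_of_length ha hb h h') hne

theorem pvSub_refl (a : List Int) : pvSub a a = true := by simp [pvSub_iff]

theorem pvSub_trans {a b c : List Int} (h1 : pvSub a b = true) (h2 : pvSub b c = true) :
    pvSub a c = true := by
  rw [pvSub_iff] at *
  exact fun t ht => h2 t (h1 t ht)

-- the ranges 1..m / 0..m-1 of both ports, normalized
theorem pvCombi_foldl (m : Nat) :
    (PySem.List.pyRange 1 ((m : Int) + 1) 1).foldl
      (fun acc i => acc ++ pvCombos (PySem.List.pyRange 0 (m : Int) 1) i.toNat) []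
    = pvCombi m := by
  rw [PySem.List.foldl_append_eq_flatMap, PySem.List.pyRange_one 1 ((m : Int) + 1),
    List.flatMap_map, List.nil_append]
  have h : ((m : Int) + 1 - 1).toNat = m := by omega
  rw [h, pvCombi]
  congr 1
  funext k
  congr 1
  omega

theorem pvB_foldl_flat {σ : Type} (m : Nat) (F : σ → List Int → σ) (init : σ) :
    (PySem.List.pyRange 1 ((m : Int) + 1) 1).foldl (fun ks size =>
       (pvCombos (PySem.List.pyRange 0 (m : Int) 1) size.toNat).foldl F ks) init
    = (pvCombi m).foldl F init := by
  rw [PySem.List.pyRange_one 1 ((m : Int) + 1), List.foldl_map, pvCombi, List.foldl_flatMap]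
  have h : ((m : Int) + 1 - 1).toNat = m := by omega
  rw [h]
  congr 1
  funext acc k
  congr 2
  omega

-- generic fold shapes for the discard loops
theorem foldl_filter_char {β : Type} (L : List β) (p : β → List Int → Bool) (s : List (List Int)) :
    L.foldl (fun t x => t.filter (p x)) s = s.filter (fun y => L.all (fun x => p x y)) := by
  induction L generalizing s with
  | nil => simp
  | cons x L ih =>
    simp only [List.foldl_cons, ih, List.filter_filter, List.all_cons]
    exact List.filter_congr (fun y _ => by rw [Bool.and_comm])

theorem foldl_discard_char {β : Type} (L : List β) (c : β → Bool) (g : β → List Int)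
    (s : List (List Int)) :
    L.foldl (fun t x => if c x then PySem.Set.discard t (g x) else t) s
      = s.filter (fun y => L.all (fun x => !c x || !(y == g x))) := by
  induction L generalizing s with
  | nil => simp
  | cons x L ih =>
    simp only [List.foldl_cons, List.all_cons]
    by_cases hc : c x
    · simp only [hc, if_true]
      rw [PySem.Set.discard, ih, List.filter_filter]
      exact List.filter_congr (fun y _ => by simp [Bool.and_comm])
    · simp only [hc]
      rw [ih]
      exact List.filter_congr (fun y _ => by simp)

theorem foldl_discard_char' {β : Type} (L : List β) (P : β → Prop) [DecidablePred P]
    (g : β → List Int) (s : List (List Int)) :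
    L.foldl (fun t x => if P x then PySem.Set.discard t (g x) else t) s
      = s.filter (fun y => L.all (fun x => !(decide (P x)) || !(y == g x))) := by
  have h := foldl_discard_char L (fun x => decide (P x)) g s
  simpa using h

-- the intersection-length test of A is the subset test
theorem pvCond_iff_sub {a b : List Int} (ha : a.Nodup) :
    ((a.length : Int) = PySem.Set.len (PySem.Set.inter (PySem.Set.ofList a) (PySem.Set.ofList b)))
      ↔ pvSub a b = true := by
  rw [PySem.Set.ofList_eq_self_of_nodup a ha, PySem.Set.inter, PySem.Set.len]
  rw [Int.natCast_inj, eq_comm, List.length_filter_eq_length_iff, pvSub_iff]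
  constructor
  · intro h t ht
    simpa using h t ht
  · intro h t ht
    simpa using h t ht

-- basic facts about u = pvU relation
theorem pvU_nodup (relation : List (List String)) : (pvU relation).Nodup :=
  (pvCombi_nodup _).filter _

theorem pvU_sizes (relation : List (List String)) :
    (pvU relation).Pairwise (fun a b => a.length ≤ b.length) :=
  (pvCombi_sizes _).filter _

theorem pvU_mem_sorted {relation : List (List String)} {j : List Int} (h : j ∈ pvU relation) :
    j.Pairwise (· < ·) :=
  pvCombi_mem_sorted (List.mem_of_mem_filter h)

-- every unique subset contains an accepted (minimal) unique subset
theorem pvU_min (relation : List (List String)) :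
    ∀ (n : Nat) (y : List Int), y.length = n → y ∈ pvU relation →
      ∃ k, k ∈ (pvU relation).filter (pvKeep (pvU relation)) ∧ pvSub k y = true := by
  intro n
  induction n using Nat.strong_induction_on with
  | _ n ih =>
    intro y hlen hy
    by_cases hk : pvKeep (pvU relation) y = true
    · exact ⟨y, List.mem_filter.mpr ⟨hy, hk⟩, pvSub_refl y⟩
    · have : ∃ y' ∈ pvU relation, pvSub y' y = true ∧ y' ≠ y := by
        simp only [pvKeep, List.all_eq_true, Bool.or_eq_true, Bool.not_eq_true', beq_iff_eq] at hk
        push_neg at hk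
        rcases hk with ⟨y', hy', h1, h2⟩
        exact ⟨y', hy', by simpa using h1, h2⟩
      rcases this with ⟨y', hy', hsub, hne⟩
      have hlt : y'.length < y.length :=
        pvSub_lt_of_ne (pvU_mem_sorted hy') (pvU_mem_sorted hy) hsub hne
      rcases ih y'.length (by omega) y' rfl hy' with ⟨k, hkmem, hksub⟩
      exact ⟨k, hkmem, pvSub_trans hksub hsub⟩

-- ===== B-side characterization =====
def pvStep (relation : List (List String)) (ks : List (PySem.Set Int)) (j : List Int) : List (PySem.Set Int) :=
  if ks.any (fun k => pvSub k j) then ks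
  else if pvUniq relation j then ks ++ [j] else ks

theorem pvB_step (relation : List (List String)) {P S' : List (List Int)} {j : List Int}
    (h : pvCombi (relation.headD []).length = P ++ j :: S') :
    pvStep relation ((P.filter (pvUniq relation)).filter (pvKeep (pvU relation))) j
      = ((P ++ [j]).filter (pvUniq relation)).filter (pvKeep (pvU relation)) := by
  have hmem : j ∈ pvCombi (relation.headD []).length := by
    rw [h]; exact List.mem_append_right _ (List.mem_cons_self ..)
  have hnd := pvCombi_nodup (relation.headD []).length
  rw [h, List.nodup_append] at hnd
  have hnotP : j ∉ P := fun hjP => hnd.2.2 j hjP j (List.mem_cons_self ..) rfl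
  have hsz : ∀ a ∈ S', j.length ≤ a.length := by
    have := pvCombi_sizes (relation.headD []).length
    rw [h, List.pairwise_append] at this
    exact (List.pairwise_cons.mp this.2.1).1
  have hPU : ∀ k, k ∈ P.filter (pvUniq relation) → k ∈ pvU relation := by
    intro k hk
    rcases List.mem_filter.mp hk with ⟨hkl, hku⟩
    exact List.mem_filter.mpr ⟨h ▸ List.mem_append_left _ hkl, hku⟩
  set base := (P.filter (pvUniq relation)).filter (pvKeep (pvU relation)) with hbase
  have hRHS : ((P ++ [j]).filter (pvUniq relation)).filter (pvKeep (pvU relation))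
      = base ++ if pvUniq relation j && pvKeep (pvU relation) j then [j] else [] := by
    rw [List.filter_append, List.filter_append]
    congr 1
    by_cases h1 : pvUniq relation j <;> by_cases h2 : pvKeep (pvU relation) j <;>
      simp [List.filter, h1, h2]
  by_cases hany : base.any (fun k => pvSub k j) = true
  · rcases List.any_eq_true.mp hany with ⟨k, hkb, hksub⟩
    have hkU : k ∈ pvU relation := hPU k (List.mem_of_mem_filter hkb)
    have hkne : k ≠ j := by
      intro hkj
      exact hnotP (hkj ▸ List.mem_of_mem_filter (List.mem_of_mem_filter hkb))
    have hkeep : pvKeep (pvU relation) j = false := by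
      rw [Bool.eq_false_iff]
      intro hke
      have := (List.all_eq_true.mp hke) k hkU
      simp only [Bool.or_eq_true, Bool.not_eq_true', beq_iff_eq] at this
      rcases this with h' | h'
      · rw [hksub] at h'; cases h'
      · exact hkne h'
    rw [pvStep, if_pos hany, hRHS, hkeep, Bool.and_false, if_neg (by simp)]
    simp
  · rw [pvStep, if_neg hany]
    by_cases huniq : pvUniq relation j = true
    · have hkeep : pvKeep (pvU relation) j = true := by
        by_contra hke
        have : ∃ y ∈ pvU relation, pvSub y j = true ∧ y ≠ j := by
          simp only [pvKeep, List.all_eq_true, Bool.or_eq_true, Bool.not_eq_true', beq_iff_eq] at hke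
          push_neg at hke
          rcases hke with ⟨y, hy, h1, h2⟩
          exact ⟨y, hy, by simpa using h1, h2⟩
        rcases this with ⟨y, hyU, hysub, hyne⟩
        have hjsorted : j.Pairwise (· < ·) := pvCombi_mem_sorted hmem
        have hylt : y.length < j.length := pvSub_lt_of_ne (pvU_mem_sorted hyU) hjsorted hysub hyne
        rcases pvU_min relation y.length y rfl hyU with ⟨k, hkmem, hksub⟩
        rcases List.mem_filter.mp hkmem with ⟨hkU, hkkeep⟩
        have hksubj : pvSub k j = true := pvSub_trans hksub hysub
        have hkle : k.length ≤ y.length := pvSub_length_le ((pvU_mem_sorted hkU).imp (fun h => ne_of_lt h)) hksub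
        have hkne : k ≠ j := by
          intro hkj
          subst hkj
          omega
        have hkP : k ∈ P := by
          have : k ∈ pvCombi (relation.headD []).length := List.mem_of_mem_filter hkU
          rw [h, List.mem_append, List.mem_cons] at this
          rcases this with h' | h' | h'
          · exact h'
          · exact absurd h' hkne
          · exact absurd (hsz k h') (by omega)
        have hkbase : k ∈ base := by
          rcases List.mem_filter.mp hkU with ⟨_, hku⟩
          exact List.mem_filter.mpr ⟨List.mem_filter.mpr ⟨hkP, hku⟩, hkkeep⟩
        exact hany (List.any_eq_true.mpr ⟨k, hkbase, hksubj⟩)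
      rw [if_pos huniq, hRHS, huniq, hkeep]
      simp
    · rw [if_neg huniq, hRHS, Bool.eq_false_iff.mpr huniq]
      simp
theorem pvB_invariant (relation : List (List String)) :
    ∀ (S P : List (List Int)), pvCombi (relation.headD []).length = P ++ S →
      S.foldl (pvStep relation) ((P.filter (pvUniq relation)).filter (pvKeep (pvU relation)))
        = (pvU relation).filter (pvKeep (pvU relation)) := by
  intro S
  induction S with
  | nil =>
    intro P h
    rw [List.append_nil] at h
    rw [List.foldl_nil, pvU, ← h]
  | cons j S' ih =>
    intro P h
    rw [List.foldl_cons, pvB_step relation h]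
    exact ih (P ++ [j]) (by rw [h, List.append_assoc]; rfl)

theorem solutionB_char (relation : List (List String)) :
    solution_alt relation = (((pvU relation).filter (pvKeep (pvU relation))).length : Int) := by
  simp only [solution_alt]
  rw [pvB_foldl_flat]
  have hcong : ∀ (ks : List (PySem.Set Int)) (j : List Int), j ∈ pvCombi (relation.headD []).length →
      (if ks.any (fun k => PySem.Set.issubset k (PySem.Set.ofList j)) then ks
        else if PySem.Set.len (PySem.Set.ofList (relation.map (fun row =>
              j.map (fun c => PySem.List.pyGetD row c "")))) = (relation.length : Int)
        then ks ++ [PySem.Set.ofList j] else ks) = pvStep relation ks j := by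
    intro ks j hj
    have hofl : PySem.Set.ofList j = j :=
      PySem.Set.ofList_eq_self_of_nodup j (pvCombi_mem_nodup hj)
    rw [pvStep, pvUniq, hofl]
    simp only [decide_eq_true_eq]
    rfl
  have hfold : List.foldl (fun (ks : List (PySem.Set Int)) (combo : List Int) =>
      if ks.any (fun k => PySem.Set.issubset k (PySem.Set.ofList combo)) then ks
      else if PySem.Set.len (PySem.Set.ofList (relation.map (fun row =>
            combo.map (fun c => PySem.List.pyGetD row c "")))) = (relation.length : Int)
      then ks ++ [PySem.Set.ofList combo] else ks) [] (pvCombi (relation.headD []).length)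
      = List.foldl (pvStep relation) [] (pvCombi (relation.headD []).length) :=
    PySem.List.foldl_congr_mem _ _ _ _ hcong
  rw [hfold]
  have h := pvB_invariant relation (pvCombi (relation.headD []).length) [] rfl
  simp only [List.filter_nil] at h
  rw [h]

-- ===== A-side characterization =====
theorem pvIdx_keep (relation : List (List String)) (y : List Int) (hy : y ∈ pvU relation) :
    ((PySem.List.pyRange 0 ((pvU relation).length : Int) 1).all (fun k =>
       (PySem.List.pyRange (k + 1) ((pvU relation).length : Int) 1).all (fun l =>
          !(decide (((PySem.List.pyGetD (pvU relation) k []).length : Int)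
              = PySem.Set.len (PySem.Set.inter
                  (PySem.Set.ofList (PySem.List.pyGetD (pvU relation) k []))
                  (PySem.Set.ofList (PySem.List.pyGetD (pvU relation) l [])))))
            || !(y == PySem.List.pyGetD (pvU relation) l []))))
    = pvKeep (pvU relation) y := by
  rw [Bool.eq_iff_iff]
  constructor
  · -- index form → membership form
    intro H
    rw [pvKeep, List.all_eq_true]
    intro y' hy'
    by_cases hsub : pvSub y' y = true
    · rw [Bool.or_eq_true]
      right
      rw [beq_iff_eq]
      by_contra hne
      rcases List.mem_iff_getElem.mp hy' with ⟨a, ha, hay⟩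
      rcases List.mem_iff_getElem.mp hy with ⟨b, hb, hby⟩
      have hab : a ≠ b := by
        intro h
        subst h
        exact hne (by rw [← hay, ← hby])
      have haltb : a < b := by
        rcases Nat.lt_or_ge a b with h' | h'
        · exact h'
        · exfalso
          have hblt : b < a := by omega
          have hlen := (List.pairwise_iff_getElem.mp (pvU_sizes relation)) b a hb ha hblt
          rw [hby, hay] at hlen
          have hlt : y'.length < y.length :=
            pvSub_lt_of_ne (pvU_mem_sorted hy') (pvU_mem_sorted hy) hsub hne
          omega
      have h1 := List.all_eq_true.mp H (a : Int)
        (by rw [PySem.List.mem_pyRange_one]; constructor <;> [omega; exact_mod_cast ha])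
      have h2 := List.all_eq_true.mp h1 (b : Int)
        (by rw [PySem.List.mem_pyRange_one]; constructor <;> [exact_mod_cast haltb; exact_mod_cast hb])
      rw [PySem.List.pyGetD_natCast, PySem.List.pyGetD_natCast,
        List.getD_eq_getElem _ _ ha, List.getD_eq_getElem _ _ hb, hay, hby] at h2
      have hcond : (((y' : List Int).length : Int)
          = PySem.Set.len (PySem.Set.inter (PySem.Set.ofList y') (PySem.Set.ofList y))) :=
        (pvCond_iff_sub ((pvU_mem_sorted hy').imp (fun h => ne_of_lt h))).mpr hsub
      simp [hcond] at h2
    · rw [Bool.or_eq_true]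
      left
      rw [Bool.not_eq_true']
      exact Bool.eq_false_iff.mpr hsub
  · -- membership form → index form
    intro H
    rw [List.all_eq_true]
    intro k hk
    rw [List.all_eq_true]
    intro l hl
    rw [PySem.List.mem_pyRange_one] at hk hl
    have hk0 : 0 ≤ k := hk.1
    have hl0 : 0 ≤ l := by omega
    lift k to Nat using hk0 with a
    lift l to Nat using hl0 with b
    have ha : a < (pvU relation).length := by exact_mod_cast hk.2
    have hb : b < (pvU relation).length := by exact_mod_cast hl.2
    have hab : a < b := by
      have := hl.1
      omega
    rw [PySem.List.pyGetD_natCast, PySem.List.pyGetD_natCast,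
      List.getD_eq_getElem _ _ ha, List.getD_eq_getElem _ _ hb]
    by_cases hcond : (((pvU relation)[a].length : Int)
        = PySem.Set.len (PySem.Set.inter (PySem.Set.ofList (pvU relation)[a])
            (PySem.Set.ofList (pvU relation)[b])))
    · have hsub : pvSub (pvU relation)[a] (pvU relation)[b] = true := by
        have hsorted := pvU_mem_sorted (List.getElem_mem ha)
        exact (pvCond_iff_sub (hsorted.imp (fun h => ne_of_lt h))).mp hcond
      have hyb : y ≠ (pvU relation)[b] := by
        intro hyb
        have h3 := List.all_eq_true.mp (H) (pvU relation)[a] (List.getElem_mem ha)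
        rw [Bool.or_eq_true, Bool.not_eq_true', beq_iff_eq] at h3
        rcases h3 with h' | h'
        · rw [← hyb] at hsub
          rw [hsub] at h'
          cases h'
        · rw [hyb] at h'
          have := (List.Nodup.getElem_inj_iff (pvU_nodup relation)).mp h'
          omega
      simp [hcond, hyb]
    · simp only [Bool.or_eq_true, Bool.not_eq_true', decide_eq_false_iff_not, beq_eq_false_iff_ne]
      exact Or.inl hcond

theorem solutionA_char (relation : List (List String)) :
    solution relation = (((pvU relation).filter (pvKeep (pvU relation))).length : Int) := by
  simp only [solution]
  rw [pvCombi_foldl]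
  have hunique := PySem.List.foldl_append_ite_eq_filter
    (p := fun j => PySem.Set.len (PySem.Set.ofList (relation.map (fun item =>
      j.map (fun key => PySem.List.pyGetD item key "")))) = (relation.length : Int))
    (pvCombi (relation.headD []).length) []
  simp only [List.nil_append] at hunique
  rw [hunique]
  have hfU : (pvCombi (relation.headD []).length).filter (fun x => decide
      (PySem.Set.len (PySem.Set.ofList (relation.map (fun item =>
        x.map (fun key => PySem.List.pyGetD item key "")))) = (relation.length : Int)))
      = pvU relation := rfl
  rw [hfU]
  have houter : (fun (ans : List (List Int)) (k : Int) =>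
      (PySem.List.pyRange (k + 1) ((pvU relation).length : Int) 1).foldl (fun ans2 l =>
        if ((PySem.List.pyGetD (pvU relation) k []).length : Int)
            = PySem.Set.len (PySem.Set.inter
                (PySem.Set.ofList (PySem.List.pyGetD (pvU relation) k []))
                (PySem.Set.ofList (PySem.List.pyGetD (pvU relation) l [])))
        then PySem.Set.discard ans2 (PySem.List.pyGetD (pvU relation) l []) else ans2) ans)
      = (fun ans k => ans.filter (fun y =>
          (PySem.List.pyRange (k + 1) ((pvU relation).length : Int) 1).all (fun l =>
            !(decide (((PySem.List.pyGetD (pvU relation) k []).length : Int)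
                = PySem.Set.len (PySem.Set.inter
                    (PySem.Set.ofList (PySem.List.pyGetD (pvU relation) k []))
                    (PySem.Set.ofList (PySem.List.pyGetD (pvU relation) l [])))))
              || !(y == PySem.List.pyGetD (pvU relation) l [])))) := by
    funext ans k
    exact foldl_discard_char' _ _ _ ans
  rw [houter, foldl_filter_char,
    PySem.Set.ofList_eq_self_of_nodup _ (pvU_nodup relation), PySem.Set.len]
  congr 1
  exact congrArg List.length (List.filter_congr (fun y hy => pvIdx_keep relation y hy))

-- ===== VERDICT (by name: the statement is the Claim_ definition above) =====
theorem solution_spec : Claim_equal_solution := by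
  intro relation _hdom _hpre
  unfold Spec_solution
  rw [solutionA_char relation, solutionB_char]
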